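-- pv_equiv track=rewrite | github.com/LampSteven17/RUSE | deployments/lib/register_experiment.py | order_entry
-- ===== SOURCE A (Python) =====
-- FIELD_ORDER = [
--     "ips",
--     "output_file",
--     "inference_file",
--     "interface",
--     "start_date",
--     "end_date",
--     "output_type",
--     "description",
--     "sup_logs_db",
-- ]
--
-- def order_entry(entry):
--     """Return entry dict with keys in canonical order."""
--     ordered = {}
--     for key in FIELD_ORDER:
--         if key in entry:
--             ordered[key] = entry[key]
--     for key in entry:
--         if key not in ordered:
--             ordered[key] = entry[key]
--     return ordered
-- ===== SOURCE B (Python) =====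
-- FIELD_ORDER = [
--     "ips",
--     "output_file",
--     "inference_file",
--     "interface",
--     "start_date",
--     "end_date",
--     "output_type",
--     "description",
--     "sup_logs_db",
-- ]
--
-- def order_entry(entry):
--     """Return entry dict with keys in canonical order (single stable sort by canonical rank)."""
--     index = {key: i for i, key in enumerate(FIELD_ORDER)}
--     return dict(sorted(entry.items(), key=lambda kv: index.get(kv[0], len(FIELD_ORDER))))
-- ===== Notes on version B (the rewrite author's own statement) =====
-- stated objective: idiomatic
-- what changed: A's two partitioning passes (canonical keys first, then the leftover scan with a membership test against the built dict) are replaced by one stable sort of entry.items() keyed by a precomputed canonical-index map, with len(FIELD_ORDER) as the shared sentinel rank for non-canonical keys.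
import Mathlib
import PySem

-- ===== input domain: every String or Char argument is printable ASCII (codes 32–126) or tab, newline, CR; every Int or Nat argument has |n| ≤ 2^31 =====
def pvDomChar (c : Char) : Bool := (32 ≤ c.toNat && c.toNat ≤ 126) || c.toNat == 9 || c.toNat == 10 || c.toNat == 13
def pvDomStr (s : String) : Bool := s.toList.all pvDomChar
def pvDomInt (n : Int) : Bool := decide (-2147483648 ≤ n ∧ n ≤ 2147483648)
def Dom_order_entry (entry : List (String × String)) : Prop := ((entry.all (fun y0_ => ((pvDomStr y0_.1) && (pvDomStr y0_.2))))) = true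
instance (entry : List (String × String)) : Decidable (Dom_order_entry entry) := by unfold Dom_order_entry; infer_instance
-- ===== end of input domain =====

-- B replaces A's two partitioning passes by one stable sort of entry.items() keyed by a canonical-index map (idiomatic; not claimed faster).

-- ===== PORT A =====
def FIELD_ORDER : List String :=
  ["ips", "output_file", "inference_file", "interface", "start_date",
   "end_date", "output_type", "description", "sup_logs_db"]

def order_entry (entry : List (String × String)) : List (String × String) :=
  let d : PySem.Dict String String := PySem.Dict.mk entry
  -- ordered = {}; for key in FIELD_ORDER: if key in entry: ordered[key] = entry[key]
  -- ('entry[key]' is ported as getD, exact under the 'key in entry' guard)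
  let ordered1 : PySem.Dict String String :=
    FIELD_ORDER.foldl (fun o key =>
      if d.contains key then o.insert key (d.getD key "") else o) PySem.Dict.empty
  -- for key in entry: if key not in ordered: ordered[key] = entry[key]
  let ordered2 : PySem.Dict String String :=
    d.keys.foldl (fun o key =>
      if o.contains key then o else o.insert key (d.getD key "")) ordered1
  ordered2.items

-- ===== PORT B =====
def pvIndex : PySem.Dict String Int :=
  (PySem.List.enumerate FIELD_ORDER).foldl (fun m p => m.insert p.2 p.1) PySem.Dict.empty

def order_entry_alt (entry : List (String × String)) : List (String × String) :=
  let d : PySem.Dict String String := PySem.Dict.mk entry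
  (PySem.Dict.ofList (PySem.List.sorted d.items
      (fun kv => pvIndex.getD kv.1 (FIELD_ORDER.length : Int)))).items

-- ===== PRECONDITION & SPEC =====
-- Pre_ excludes association lists with duplicate keys: A's argument is a Python dict, which cannot
-- contain a duplicate key, so such lists represent no Python input (both programs raise on a raw
-- list of pairs).
def Pre_order_entry (entry : List (String × String)) : Prop := (entry.map Prod.fst).Nodup
instance (entry : List (String × String)) : Decidable (Pre_order_entry entry) := by unfold Pre_order_entry; infer_instance
def pvWitness_order_entry : (List (String × String)) :=
  [("interface", "eth0"), ("note", "x"), ("ips", "10.0.0.1")]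
def Spec_order_entry (entry : List (String × String)) (out : List (String × String)) : Prop := out = order_entry_alt entry
instance (entry : List (String × String)) (out : List (String × String)) : Decidable (Spec_order_entry entry out) := by unfold Spec_order_entry; infer_instance

-- ===== CLAIM (what is proved, stated in full; the proofs are below) =====
def Claim_equal_order_entry : Prop := ∀ (entry : List (String × String)), Dom_order_entry entry → Pre_order_entry entry → Spec_order_entry entry (order_entry entry)

-- ===== LEMMAS AND PROOFS =====

-- insertBy passes a block whose elements do not trigger `before`.
theorem pv_insertBy_append_left {α : Type} (before : α → α → Bool) (x : α) (l1 l2 : List α)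
    (h : ∀ y ∈ l1, before x y = false) :
    PySem.List.insertBy before x (l1 ++ l2) = l1 ++ PySem.List.insertBy before x l2 := by
  induction l1 with
  | nil => rfl
  | cons y t ih =>
    simp only [List.cons_append, PySem.List.insertBy, h y (by simp)]
    simp only [Bool.false_eq_true, if_false, List.cons.injEq, true_and]
    exact ih (fun z hz => h z (by simp [hz]))

-- insertBy puts x in front when the head (if any) triggers `before`.
theorem pv_insertBy_head {α : Type} (before : α → α → Bool) (x : α) (l : List α)
    (h : ∀ z ∈ l.head?, before x z = true) :
    PySem.List.insertBy before x l = x :: l := by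
  cases l with
  | nil => rfl
  | cons z t => simp [PySem.List.insertBy, h z (by simp)]

-- Inserting an element into a rank-bucketed concatenation appends it to the end of its bucket.
theorem pv_insertBy_flatMap {α : Type} (key : α → Int) (x : α) (rs : List Int) (B : Int → List α)
    (hrs : rs.Pairwise (· < ·)) (hx : key x ∈ rs)
    (hB : ∀ r ∈ rs, ∀ y ∈ B r, key y = r) :
    PySem.List.insertBy (fun a b => decide (key a < key b)) x (rs.flatMap B)
      = rs.flatMap (fun r => B r ++ if key x = r then [x] else []) := by
  induction rs with
  | nil => simp at hx
  | cons r rs ih =>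
    have hlt : ∀ r' ∈ rs, r < r' := (List.pairwise_cons.1 hrs).1
    simp only [List.flatMap_cons]
    by_cases hxr : key x = r
    · rw [pv_insertBy_append_left _ _ _ _ (fun y hy => by
        simp [hB r (by simp) y hy, hxr])]
      rw [pv_insertBy_head _ _ _ (fun z hz => by
        obtain ⟨r', hr', hz'⟩ := List.mem_flatMap.1 (List.mem_of_mem_head? hz)
        have hzr := hB r' (by simp [hr']) z hz'
        have := hlt r' hr'
        simp only [decide_eq_true_eq]; omega)]
      have hrest : rs.flatMap (fun r' => B r' ++ if key x = r' then [x] else []) = rs.flatMap B := by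
        apply List.flatMap_congr; intro r' hr'
        have := hlt r' hr'
        have : key x ≠ r' := by omega
        simp [this]
      rw [hrest, if_pos hxr]
      simp
    · have hx' : key x ∈ rs := by rcases List.mem_cons.1 hx with h | h; exact absurd h hxr; exact h
      rw [pv_insertBy_append_left _ _ _ _ (fun y hy => by
        have hyr := hB r (by simp) y hy
        have := hlt _ hx'
        simp only [decide_eq_false_iff_not]; omega)]
      rw [ih (hrs.of_cons) hx' (fun r' hr' y hy => hB r' (by simp [hr']) y hy)]
      simp [hxr]

-- Python's stable sort by an Int-valued key with values in the strictly increasing list rs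
-- is the concatenation of the rank buckets, each in original order.
theorem pv_sorted_buckets {α : Type} (key : α → Int) (rs : List Int)
    (hrs : rs.Pairwise (· < ·)) (xs : List α) (hxs : ∀ x ∈ xs, key x ∈ rs) :
    PySem.List.sorted xs key = rs.flatMap (fun r => xs.filter (fun x => decide (key x = r))) := by
  rw [PySem.List.sorted_eq_foldl_insertBy]
  induction xs using List.reverseRecOn with
  | nil => simp
  | append_singleton ys x ih =>
    rw [List.foldl_append]
    simp only [List.foldl_cons, List.foldl_nil]
    rw [ih (fun y hy => hxs y (by simp [hy]))]
    rw [pv_insertBy_flatMap key x rs _ hrs (hxs x (by simp))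
      (fun r _ y hy => by simpa using (List.mem_filter.1 hy).2)]
    apply List.flatMap_congr; intro r _
    by_cases h : key x = r <;> simp [List.filter_append, h]

-- The canonical rank of a key, written out.
set_option maxHeartbeats 1600000 in
theorem pv_rank_spec (s : String) :
    pvIndex.getD s 9 =
      (if s = "ips" then 0 else if s = "output_file" then 1 else if s = "inference_file" then 2
       else if s = "interface" then 3 else if s = "start_date" then 4 else if s = "end_date" then 5
       else if s = "output_type" then 6 else if s = "description" then 7
       else if s = "sup_logs_db" then 8 else 9 : Int) := by
  have h : pvIndex = PySem.Dict.mk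
      [("ips", 0), ("output_file", 1), ("inference_file", 2), ("interface", 3), ("start_date", 4),
       ("end_date", 5), ("output_type", 6), ("description", 7), ("sup_logs_db", 8)] := by rfl
  rw [h, PySem.Dict.getD_eq_get?_getD]
  by_cases h1 : s = "ips"; · subst h1; rfl
  by_cases h2 : s = "output_file"; · subst h2; rfl
  by_cases h3 : s = "inference_file"; · subst h3; rfl
  by_cases h4 : s = "interface"; · subst h4; rfl
  by_cases h5 : s = "start_date"; · subst h5; rfl
  by_cases h6 : s = "end_date"; · subst h6; rfl
  by_cases h7 : s = "output_type"; · subst h7; rfl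
  by_cases h8 : s = "description"; · subst h8; rfl
  by_cases h9 : s = "sup_logs_db"; · subst h9; rfl
  simp only [PySem.Dict.get?_mk_cons, beq_iff_eq]
  rw [if_neg (fun h => h1 h.symm), if_neg (fun h => h2 h.symm), if_neg (fun h => h3 h.symm),
      if_neg (fun h => h4 h.symm), if_neg (fun h => h5 h.symm), if_neg (fun h => h6 h.symm),
      if_neg (fun h => h7 h.symm), if_neg (fun h => h8 h.symm), if_neg (fun h => h9 h.symm)]
  simp [h1, h2, h3, h4, h5, h6, h7, h8, h9]
  rfl

-- On a duplicate-free association list, filtering by one key is the dict lookup of that key.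
theorem pv_filter_key (entry : List (String × String)) (k : String)
    (hnd : (entry.map Prod.fst).Nodup) :
    entry.filter (fun kv => kv.1 == k)
      = if (PySem.Dict.mk entry).contains k
        then [(k, (PySem.Dict.mk entry).getD k "")] else [] := by
  induction entry with
  | nil => simp [PySem.Dict.contains_mk]
  | cons p t ih =>
    obtain ⟨k0, v0⟩ := p
    simp only [List.map_cons, List.nodup_cons] at hnd
    by_cases h : k0 = k
    · subst h
      have hfilter : t.filter (fun kv => kv.1 == k0) = [] := by
        rw [List.filter_eq_nil_iff]
        intro kv hkv
        simp only [beq_iff_eq]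
        intro hk
        exact hnd.1 (hk ▸ List.mem_map_of_mem hkv)
      simp [hfilter, PySem.Dict.contains_mk,
        PySem.Dict.getD_eq_get?_getD, PySem.Dict.get?_mk_cons]
    · rw [List.filter_cons_of_neg (by simp [h])]
      rw [ih hnd.2]
      have hc : (PySem.Dict.mk ((k0, v0) :: t)).contains k = (PySem.Dict.mk t).contains k := by
        simp [PySem.Dict.contains_mk, h]
      have hg : (PySem.Dict.mk ((k0, v0) :: t)).getD k "" = (PySem.Dict.mk t).getD k "" := by
        simp [PySem.Dict.getD_eq_get?_getD, PySem.Dict.get?_mk_cons, h]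
      rw [hc, hg]

-- First loop of A: over duplicate-free fresh keys, the fold appends one item per present key.
theorem pv_foldl1_items (d : PySem.Dict String String) :
    ∀ (ks : List String), ks.Nodup → ∀ (o : PySem.Dict String String),
      (∀ k ∈ ks, o.contains k = false) →
      (ks.foldl (fun o key => if d.contains key then o.insert key (d.getD key "") else o) o).items
        = o.items ++ ks.flatMap (fun k => if d.contains k then [(k, d.getD k "")] else []) := by
  intro ks
  induction ks with
  | nil => intro _ o _; simp
  | cons k t ih =>
    intro hnd o ho
    simp only [List.nodup_cons] at hnd
    simp only [List.foldl_cons, List.flatMap_cons]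
    by_cases hc : d.contains k = true
    · rw [if_pos hc, ih hnd.2 _ (fun k' hk' => by
        rw [PySem.Dict.contains_insert]
        have : k' ≠ k := fun h => hnd.1 (h ▸ hk')
        simp [this, ho k' (by simp [hk'])])]
      rw [PySem.Dict.items_insert_of_not_contains _ _ (ho k (by simp))]
      simp [hc, List.append_assoc]
    · rw [if_neg hc, ih hnd.2 o (fun k' hk' => ho k' (by simp [hk']))]
      simp [hc]

-- Second loop of A: over duplicate-free keys, the guard only ever sees the initial dict.
theorem pv_foldl2_items (d : PySem.Dict String String) :
    ∀ (ks : List String), ks.Nodup → ∀ (o : PySem.Dict String String),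
      (ks.foldl (fun o key => if o.contains key then o else o.insert key (d.getD key "")) o).items
        = o.items ++ ks.flatMap (fun k => if o.contains k then [] else [(k, d.getD k "")]) := by
  intro ks
  induction ks with
  | nil => intro _ o; simp
  | cons k t ih =>
    intro hnd o
    simp only [List.nodup_cons] at hnd
    simp only [List.foldl_cons, List.flatMap_cons]
    by_cases hc : o.contains k = true
    · rw [if_pos hc, ih hnd.2 o]
      simp [hc]
    · rw [if_neg hc, ih hnd.2 _]
      rw [PySem.Dict.items_insert_of_not_contains _ _ (by simpa using hc)]
      have hcongr : t.flatMap (fun k' =>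
            if (o.insert k (d.getD k "")).contains k' then [] else [(k', d.getD k' "")])
          = t.flatMap (fun k' => if o.contains k' then [] else [(k', d.getD k' "")]) := by
        apply List.flatMap_congr; intro k' hk'
        rw [PySem.Dict.contains_insert]
        have : k' ≠ k := fun h => hnd.1 (h ▸ hk')
        simp [this]
      rw [hcongr]
      simp [hc, List.append_assoc]

-- dict() of a duplicate-free pair list keeps the list as its items.
theorem pv_update_items :
    ∀ (l : List (String × String)), (l.map Prod.fst).Nodup →
      ∀ (o : PySem.Dict String String), (∀ k ∈ l.map Prod.fst, o.contains k = false) →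
      (o.update l).items = o.items ++ l := by
  intro l
  induction l with
  | nil => intro _ o _; simp [PySem.Dict.update]
  | cons p t ih =>
    intro hnd o ho
    obtain ⟨k, v⟩ := p
    simp only [List.map_cons, List.nodup_cons] at hnd
    simp only [PySem.Dict.update, List.foldl_cons] at *
    rw [ih hnd.2 _ (fun k' hk' => by
      rw [PySem.Dict.contains_insert]
      have : k' ≠ k := fun h => hnd.1 (h ▸ hk')
      simp [this, ho k' (by simp [hk'])])]
    rw [PySem.Dict.items_insert_of_not_contains _ _ (ho k (by simp))]
    simp [List.append_assoc]

theorem pv_ofList_items (l : List (String × String)) (h : (l.map Prod.fst).Nodup) :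
    (PySem.Dict.ofList l).items = l := by
  have := pv_update_items l h PySem.Dict.empty (fun k _ => PySem.Dict.contains_empty k)
  simpa [PySem.Dict.ofList] using this

-- The dict built by A's first loop contains exactly the canonical keys present in entry.
theorem pv_O1_contains (d : PySem.Dict String String) (o : PySem.Dict String String)
    (hitems : o.items = FIELD_ORDER.flatMap
      (fun k => if d.contains k then [(k, d.getD k "")] else [])) (k : String) :
    o.contains k = (decide (k ∈ FIELD_ORDER) && d.contains k) := by
  obtain ⟨its⟩ := o
  subst hitems
  rw [PySem.Dict.contains_mk]
  cases hdk : d.contains k with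
  | true =>
    by_cases hmem : k ∈ FIELD_ORDER
    · simp only [hmem, decide_true, Bool.true_and]
      rw [List.any_eq_true]
      exact ⟨(k, d.getD k ""), List.mem_flatMap.2 ⟨k, hmem, by simp [hdk]⟩, by simp⟩
    · simp only [hmem, decide_false, Bool.false_and]
      rw [List.any_eq_false]
      intro p hp
      obtain ⟨k', hk', hp'⟩ := List.mem_flatMap.1 hp
      by_cases hck' : d.contains k' = true
      · simp [hck'] at hp'
        subst hp'
        simp only [beq_iff_eq]
        exact fun h => hmem (h ▸ hk')
      · simp [hck'] at hp'
  | false =>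
    simp only [Bool.and_false]
    rw [List.any_eq_false]
    intro p hp
    obtain ⟨k', hk', hp'⟩ := List.mem_flatMap.1 hp
    by_cases hck' : d.contains k' = true
    · simp [hck'] at hp'
      subst hp'
      simp only [beq_iff_eq]
      intro h
      rw [h] at hck'
      simp [hdk] at hck'
    · simp [hck'] at hp'

-- Trailing keys, read off the key list with the full-dict lookup, are the non-canonical pairs.
theorem pv_second_items (entry : List (String × String))
    (hnd : (entry.map Prod.fst).Nodup) :
    (entry.map Prod.fst).flatMap
        (fun k => if k ∈ FIELD_ORDER then [] else [(k, (PySem.Dict.mk entry).getD k "")])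
      = entry.filter (fun kv => !(decide (kv.1 ∈ FIELD_ORDER))) := by
  induction entry with
  | nil => simp
  | cons p t ih =>
    obtain ⟨k0, v0⟩ := p
    simp only [List.map_cons, List.nodup_cons] at hnd
    simp only [List.map_cons, List.flatMap_cons]
    have hg0 : (PySem.Dict.mk ((k0, v0) :: t)).getD k0 "" = v0 := by
      simp [PySem.Dict.getD_eq_get?_getD, PySem.Dict.get?_mk_cons]
    have hcongr : (t.map Prod.fst).flatMap
          (fun k => if k ∈ FIELD_ORDER then [] else [(k, (PySem.Dict.mk ((k0, v0) :: t)).getD k "")])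
        = (t.map Prod.fst).flatMap
          (fun k => if k ∈ FIELD_ORDER then [] else [(k, (PySem.Dict.mk t).getD k "")]) := by
      apply List.flatMap_congr; intro k hk
      have : k0 ≠ k := fun h => hnd.1 (h ▸ hk)
      simp [PySem.Dict.getD_eq_get?_getD, PySem.Dict.get?_mk_cons, this]
    rw [hcongr, ih hnd.2]
    by_cases hmem : k0 ∈ FIELD_ORDER <;> simp [hmem, hg0]

theorem pv_rank0 (s : String) : pvIndex.getD s 9 = 0 ↔ s = "ips" := by
  rw [pv_rank_spec]; split_ifs <;> simp_all

theorem pv_rank1 (s : String) : pvIndex.getD s 9 = 1 ↔ s = "output_file" := by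
  rw [pv_rank_spec]; split_ifs <;> simp_all

theorem pv_rank2 (s : String) : pvIndex.getD s 9 = 2 ↔ s = "inference_file" := by
  rw [pv_rank_spec]; split_ifs <;> simp_all

theorem pv_rank3 (s : String) : pvIndex.getD s 9 = 3 ↔ s = "interface" := by
  rw [pv_rank_spec]; split_ifs <;> simp_all

theorem pv_rank4 (s : String) : pvIndex.getD s 9 = 4 ↔ s = "start_date" := by
  rw [pv_rank_spec]; split_ifs <;> simp_all

theorem pv_rank5 (s : String) : pvIndex.getD s 9 = 5 ↔ s = "end_date" := by
  rw [pv_rank_spec]; split_ifs <;> simp_all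

theorem pv_rank6 (s : String) : pvIndex.getD s 9 = 6 ↔ s = "output_type" := by
  rw [pv_rank_spec]; split_ifs <;> simp_all

theorem pv_rank7 (s : String) : pvIndex.getD s 9 = 7 ↔ s = "description" := by
  rw [pv_rank_spec]; split_ifs <;> simp_all

theorem pv_rank8 (s : String) : pvIndex.getD s 9 = 8 ↔ s = "sup_logs_db" := by
  rw [pv_rank_spec]; split_ifs <;> simp_all

theorem pv_rank9 (s : String) : (pvIndex.getD s 9 = 9) ↔ ¬ (s ∈ FIELD_ORDER) := by
  rw [pv_rank_spec]; split_ifs <;> simp_all [FIELD_ORDER]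

theorem pv_bucket9 (entry : List (String × String)) :
    entry.filter (fun kv => decide (pvIndex.getD kv.1 9 = 9))
      = entry.filter (fun kv => !(decide (kv.1 ∈ FIELD_ORDER))) := by
  apply List.filter_congr; intro kv _
  show decide (pvIndex.getD kv.1 9 = 9) = !(decide (kv.1 ∈ FIELD_ORDER))
  by_cases h : kv.1 ∈ FIELD_ORDER <;> simp [h, pv_rank9]

set_option maxHeartbeats 1000000 in
theorem order_entry_spec : Claim_equal_order_entry := by
  intro entry _ hnd
  unfold Pre_order_entry at hnd
  unfold Spec_order_entry
  simp only [order_entry, order_entry_alt]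
  have hdc : ∀ k ∈ entry.map Prod.fst, (PySem.Dict.mk entry).contains k = true := by
    intro k hk
    obtain ⟨p, hp, rfl⟩ := List.mem_map.1 hk
    rw [PySem.Dict.contains_mk]
    exact List.any_eq_true.2 ⟨p, hp, by simp⟩
  have h1 := pv_foldl1_items (PySem.Dict.mk entry) FIELD_ORDER (by decide)
    PySem.Dict.empty (fun k _ => PySem.Dict.contains_empty k)
  have h1' : (FIELD_ORDER.foldl (fun o key =>
        if (PySem.Dict.mk entry).contains key
        then o.insert key ((PySem.Dict.mk entry).getD key "") else o) PySem.Dict.empty).items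
      = FIELD_ORDER.flatMap (fun k =>
        if (PySem.Dict.mk entry).contains k
        then [(k, (PySem.Dict.mk entry).getD k "")] else []) := by
    rw [h1]; rfl
  -- A side: items = canonical part ++ trailing part
  rw [PySem.Dict.keys_mk, pv_foldl2_items (PySem.Dict.mk entry) (entry.map Prod.fst) hnd _, h1']
  have hsec : (entry.map Prod.fst).flatMap (fun k =>
        if (FIELD_ORDER.foldl (fun o key =>
              if (PySem.Dict.mk entry).contains key
              then o.insert key ((PySem.Dict.mk entry).getD key "") else o)
            PySem.Dict.empty).contains k
        then [] else [(k, (PySem.Dict.mk entry).getD k "")])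
      = entry.filter (fun kv => !(decide (kv.1 ∈ FIELD_ORDER))) := by
    rw [← pv_second_items entry hnd]
    apply List.flatMap_congr; intro k hk
    rw [pv_O1_contains (PySem.Dict.mk entry) _ h1' k, hdc k hk]
    by_cases hm : k ∈ FIELD_ORDER <;> simp [hm]
  rw [hsec]
  -- B side: dict(sorted(...)) is the sorted pair list itself
  have hkf : (fun kv : String × String => pvIndex.getD kv.1 (FIELD_ORDER.length : Int))
      = (fun kv : String × String => pvIndex.getD kv.1 9) := by
    funext kv; norm_num [FIELD_ORDER]
  rw [hkf]
  have hperm := PySem.List.sorted_perm entry (fun kv : String × String => pvIndex.getD kv.1 9) false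
  have hSnd : ((PySem.List.sorted entry
      (fun kv : String × String => pvIndex.getD kv.1 9)).map Prod.fst).Nodup :=
    ((hperm.map Prod.fst).nodup_iff).2 hnd
  rw [pv_ofList_items _ hSnd]
  rw [pv_sorted_buckets (fun kv : String × String => pvIndex.getD kv.1 9)
    ([0, 1, 2, 3, 4, 5, 6, 7, 8, 9] : List Int) (by decide) entry
    (fun kv _ => by show pvIndex.getD kv.1 9 ∈ _; rw [pv_rank_spec]; split_ifs <;> decide)]
  -- convert each rank bucket to A's per-key lookup
  have conv : ∀ (i : Int) (k : String), (∀ s, pvIndex.getD s 9 = i ↔ s = k) →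
      entry.filter (fun kv => decide (pvIndex.getD kv.1 9 = i))
        = if (PySem.Dict.mk entry).contains k
          then [(k, (PySem.Dict.mk entry).getD k "")] else [] := by
    intro i k hik
    rw [← pv_filter_key entry k hnd]
    apply List.filter_congr; intro kv _
    show decide (pvIndex.getD kv.1 9 = i) = (kv.1 == k)
    simp only [hik]
    cases h : (kv.1 == k) <;> simp_all
  have e0 := conv 0 "ips" pv_rank0
  have e1 := conv 1 "output_file" pv_rank1
  have e2 := conv 2 "inference_file" pv_rank2
  have e3 := conv 3 "interface" pv_rank3
  have e4 := conv 4 "start_date" pv_rank4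
  have e5 := conv 5 "end_date" pv_rank5
  have e6 := conv 6 "output_type" pv_rank6
  have e7 := conv 7 "description" pv_rank7
  have e8 := conv 8 "sup_logs_db" pv_rank8
  have e9 := pv_bucket9 entry
  simp only [List.flatMap_cons, List.flatMap_nil, List.append_nil, e0, e1, e2, e3, e4, e5, e6,
    e7, e8, e9]
  simp only [FIELD_ORDER, List.flatMap_cons, List.flatMap_nil, List.append_nil]
  simp [List.append_assoc]
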